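-- pv_equiv track=rewrite | github.com/Elozino-Egonmwan/text-summarization | Helper/_data_generator.py | get_abs_art
-- ===== SOURCE A (Python) =====
-- def get_abs_art(sent):
--   article_sents = []
--   abstract_sents = []
--   is_article = False
--   for word in sent.split():
--     if (word.startswith('article=')):
--       is_article = True
--     if is_article:
--       article_sents.append(word)
--     else:
--       abstract_sents.append(word)
--
--   # Make abstract into a single string and remove all unnecessary annotations
--   abstract = ' '.join(abstract_sents)
--   abstract = abstract.replace('abstract=b"','').replace("abstract=b'",'').replace('<s>','').replace('</s>"','').replace('</s>','.').replace('. .','.')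
--
--   # Make article into a single string and remove all unnecessary annotations
--   article = ' '.join(article_sents)
--   article = article.replace('article=b','').replace('"','')
--
--   return abstract, article
-- ===== SOURCE B (Python) =====
-- def get_abs_art(sent):
--     # Work on one whitespace-normalized string instead of partitioning a word list:
--     # the article part begins where 'article=' occurs at a word boundary of norm.
--     norm = ' '.join(sent.split())
--     if norm.startswith('article='):
--         pos = 0
--     else:
--         k = norm.find(' article=')
--         pos = -1 if k == -1 else k + 1
--     if pos == -1:
--         abstract, article = norm, ''
--     elif pos == 0:
--         abstract, article = '', norm
--     else:
--         abstract, article = norm[:pos - 1], norm[pos:]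
--     abstract = abstract.replace('abstract=b"','').replace("abstract=b'",'').replace('<s>','').replace('</s>"','').replace('</s>','.').replace('. .','.')
--     article = article.replace('article=b','').replace('"','')
--     return abstract, article
-- ===== Notes on version B (the rewrite author's own statement) =====
-- stated objective: alternative
-- what changed: B never partitions a word list: it whitespace-normalizes the sentence into a single string and locates the article boundary by one substring search for the marker prefix at a word boundary of that string, then slices the string there; A instead carries a boolean flag across a word loop and accumulates two lists. The cleanup replace chains are kept verbatim.
import Mathlib
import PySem

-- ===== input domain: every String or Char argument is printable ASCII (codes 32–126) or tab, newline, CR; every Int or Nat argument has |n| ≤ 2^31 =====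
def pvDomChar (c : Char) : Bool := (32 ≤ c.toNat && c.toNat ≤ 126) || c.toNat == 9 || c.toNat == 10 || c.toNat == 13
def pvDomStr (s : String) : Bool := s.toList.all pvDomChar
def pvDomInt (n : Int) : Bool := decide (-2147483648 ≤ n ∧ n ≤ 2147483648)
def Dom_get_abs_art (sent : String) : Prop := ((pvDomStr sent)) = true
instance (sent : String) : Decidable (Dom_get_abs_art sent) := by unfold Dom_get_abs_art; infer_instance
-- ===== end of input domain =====

-- B drops A's word-list partition entirely: it whitespace-normalizes the sentence once and
-- locates the article boundary by substring search (' article=' / leading 'article=') on the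
-- normalized string, slicing it there; objective: alternative. Equal on all inputs.

-- ===== PORT A =====
-- shared cleanup: the two replace chains applied to the joined abstract/article strings
def cleanPair (abstract article : String) : String × String :=
  (PySem.Str.replace (PySem.Str.replace (PySem.Str.replace (PySem.Str.replace
      (PySem.Str.replace (PySem.Str.replace abstract "abstract=b\"" "") "abstract=b'" "")
      "<s>" "") "</s>\"" "") "</s>" ".") ". ." ".",
   PySem.Str.replace (PySem.Str.replace article "article=b" "") "\"" "")

-- A's loop: state = (article_sents, abstract_sents, is_article)
def getAbsArtLoopA (words : List String)
    (st : List String × List String × Bool) : List String × List String × Bool :=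
  words.foldl (fun st word =>
    let is_article := if PySem.Str.startswith word "article=" then true else st.2.2
    if is_article then (st.1 ++ [word], st.2.1, is_article)
    else (st.1, st.2.1 ++ [word], is_article)) st

def get_abs_art (sent : String) : String × String :=
  let st := getAbsArtLoopA (PySem.Str.split₀ sent) ([], [], false)
  cleanPair (PySem.Str.join " " st.2.1) (PySem.Str.join " " st.1)

-- ===== PORT B =====
def get_abs_art_alt (sent : String) : String × String :=
  let norm := PySem.Str.join " " (PySem.Str.split₀ sent)
  let pos : Int :=
    if PySem.Str.startswith norm "article=" then 0
    else
      let k := PySem.Str.find norm " article="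
      if k = -1 then -1 else k + 1
  if pos = -1 then cleanPair norm ""
  else if pos = 0 then cleanPair "" norm
  else cleanPair (PySem.Str.slice norm none (some (pos - 1))) (PySem.Str.slice norm (some pos) none)

-- ===== PRECONDITION & SPEC =====
def Spec_get_abs_art (sent : String) (out : String × String) : Prop := out = get_abs_art_alt sent
instance (sent : String) (out : String × String) : Decidable (Spec_get_abs_art sent out) := by unfold Spec_get_abs_art; infer_instance

-- ===== CLAIM =====
def Claim_equal_get_abs_art : Prop := ∀ (sent : String), Dom_get_abs_art sent → Spec_get_abs_art sent (get_abs_art sent)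

-- ===== LEMMAS AND PROOFS =====

-- the marker "article=" and its space-prefixed search key, as char lists
def markerL : List Char := ['a', 'r', 't', 'i', 'c', 'l', 'e', '=']

-- a word produced by split(): nonempty and whitespace-free
def goodWord (w : List Char) : Prop := w ≠ [] ∧ ∀ c ∈ w, PySem.Chars.isspace c = false

theorem split₀_go_good (s : List Char) : ∀ (cur : List Char) (acc : List (List Char)),
    (∀ w ∈ acc, goodWord w) → (∀ c ∈ cur, PySem.Chars.isspace c = false) →
    ∀ w ∈ PySem.Chars.split₀.go s cur acc, goodWord w := by
  induction s with
  | nil =>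
      intro cur acc hacc hcur w hw
      by_cases hc : cur.isEmpty
      · simp only [PySem.Chars.split₀.go, hc, if_true, List.mem_reverse] at hw
        exact hacc w hw
      · rw [show PySem.Chars.split₀.go [] cur acc = (cur.reverse :: acc).reverse from by
            simp [PySem.Chars.split₀.go, hc]] at hw
        rcases List.mem_cons.mp (List.mem_reverse.mp hw) with h | h
        · subst h
          refine ⟨?_, ?_⟩
          · simp only [ne_eq, List.reverse_eq_nil_iff]
            exact fun h => hc (by simp [h])
          · intro c hcm; exact hcur c (List.mem_reverse.mp hcm)
        · exact hacc w h
  | cons c rest ih =>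
      intro cur acc hacc hcur w hw
      by_cases hs : PySem.Chars.isspace c
      · by_cases hc : cur.isEmpty
        · simp only [PySem.Chars.split₀.go, hs, hc, if_true] at hw
          exact ih [] acc hacc (by simp) w hw
        · simp only [PySem.Chars.split₀.go, hs, hc, if_true, if_false] at hw
          refine ih [] (cur.reverse :: acc) ?_ (by simp) w hw
          intro v hv
          rcases List.mem_cons.mp hv with h | h
          · subst h
            refine ⟨?_, fun d hd => hcur d (List.mem_reverse.mp hd)⟩
            simp only [ne_eq, List.reverse_eq_nil_iff]
            exact fun h => hc (by simp [h])
          · exact hacc v h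
      · simp only [PySem.Chars.split₀.go, hs, if_false] at hw
        refine ih (c :: cur) acc hacc ?_ w hw
        intro d hd
        rcases List.mem_cons.mp hd with h | h
        · subst h; exact Bool.eq_false_iff.mpr hs
        · exact hcur d h

theorem split₀_good (s : List Char) : ∀ w ∈ PySem.Chars.split₀ s, goodWord w := by
  intro w hw
  exact split₀_go_good s [] [] (by simp) (by simp) w hw

-- joining with " ": cons form when the tail is nonempty
theorem join_cons_ne (w : List Char) (rest : List (List Char)) (h : rest ≠ []) :
    PySem.Chars.join [' '] (w :: rest) = w ++ ' ' :: PySem.Chars.join [' '] rest := by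
  cases rest with
  | nil => exact absurd rfl h
  | cons r t => rw [PySem.Chars.join_cons_cons]; simp

theorem join_len_pos (ls : List (List Char)) (hg : ∀ w ∈ ls, goodWord w) (h : ls ≠ []) :
    0 < (PySem.Chars.join [' '] ls).length := by
  cases ls with
  | nil => exact absurd rfl h
  | cons w rest =>
      have hw : w ≠ [] := (hg w (by simp)).1
      cases rest with
      | nil => simpa [PySem.Chars.join_singleton] using List.length_pos_iff.mpr hw
      | cons r t =>
          rw [join_cons_ne w (r :: t) (by simp)]
          simp

-- splitting the joined string at an internal word boundary
theorem join_split (ls : List (List Char)) : ∀ (j : Nat), 0 < j → j < ls.length →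
    PySem.Chars.join [' '] ls
      = PySem.Chars.join [' '] (ls.take j) ++ ' ' :: PySem.Chars.join [' '] (ls.drop j) := by
  induction ls with
  | nil => intro j h1 h2; simp at h2
  | cons w rest ih =>
      intro j h1 h2
      have hrest : rest ≠ [] := by
        intro h; subst h; simp at h2; omega
      rcases Nat.eq_or_lt_of_le h1 with h | h
      · -- j = 1
        subst h
        simp only [List.take_succ_cons, List.take_zero, List.drop_succ_cons, List.drop_zero]
        rw [join_cons_ne w rest hrest, PySem.Chars.join_singleton]
      · -- j ≥ 2
        obtain ⟨j', rfl⟩ : ∃ j', j = j' + 1 := ⟨j - 1, by omega⟩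
        have hj' : 0 < j' := by omega
        have hj'len : j' < rest.length := by simp at h2; omega
        have htk : rest.take j' ≠ [] := by
          intro h
          rcases List.take_eq_nil_iff.mp h with h | h
          · omega
          · subst h; simp at hj'len
        rw [join_cons_ne w rest hrest, ih j' hj' hj'len]
        simp only [List.take_succ_cons, List.drop_succ_cons]
        rw [join_cons_ne w (rest.take j') htk]
        simp

-- a space in the joined string occurs only at a word boundary
theorem space_drop (ls : List (List Char)) : ∀ (hg : ∀ w ∈ ls, goodWord w) (i : Nat) (t : List Char),
    (PySem.Chars.join [' '] ls).drop i = ' ' :: t →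
    ∃ j, 0 < j ∧ j < ls.length ∧ i = (PySem.Chars.join [' '] (ls.take j)).length := by
  induction ls with
  | nil => intro hg i t h; simp [PySem.Chars.join_nil] at h
  | cons w rest ih =>
      intro hg i t h
      have hwg : goodWord w := hg w (by simp)
      have hnospace : ∀ c ∈ w, c ≠ ' ' := by
        intro c hc hcsp; subst hcsp
        have := hwg.2 ' ' hc
        simp [PySem.Chars.isspace] at this
      cases rest with
      | nil =>
          rw [PySem.Chars.join_singleton] at h
          have : ' ' ∈ w := by
            have : ' ' ∈ w.drop i := by rw [h]; simp
            exact List.mem_of_mem_drop this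
          exact absurd rfl (hnospace ' ' this)
      | cons r rt =>
          rw [join_cons_ne w (r :: rt) (by simp)] at h
          rcases lt_trichotomy i w.length with hi | hi | hi
          · -- inside w: contradiction
            rw [List.drop_append_of_le_length (le_of_lt hi)] at h
            cases hd : w.drop i with
            | nil =>
                exfalso
                have := congrArg List.length hd
                simp at this; omega
            | cons c cs =>
                rw [hd] at h
                have hc : c = ' ' := by simpa using congrArg (·.head?) h
                have : c ∈ w := List.mem_of_mem_drop (by rw [hd]; simp)
                exact absurd hc (hnospace c this)
          · -- boundary after w: j = 1
            refine ⟨1, by omega, by simp, ?_⟩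
            simp [PySem.Chars.join_singleton, hi]
          · -- inside the tail: recurse
            obtain ⟨i', rfl⟩ : ∃ i', i = w.length + 1 + i' := ⟨i - w.length - 1, by omega⟩
            have hdt : (PySem.Chars.join [' '] (r :: rt)).drop i' = ' ' :: t := by
              have hdr : (w ++ ' ' :: PySem.Chars.join [' '] (r :: rt)).drop (w.length + 1 + i')
                  = (PySem.Chars.join [' '] (r :: rt)).drop i' := by
                rw [List.drop_append]
                rw [List.drop_eq_nil_of_le (by omega : w.length ≤ w.length + 1 + i')]
                have h2 : w.length + 1 + i' - w.length = i' + 1 := by omega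
                rw [h2]
                simp
              rw [← hdr]; exact h
            obtain ⟨j', hj'0, hj'len, hj'eq⟩ :=
              ih (fun v hv => hg v (by simp [hv])) i' t hdt
            refine ⟨j' + 1, by omega, by
              have hc := hj'len
              simp only [List.length_cons] at hc ⊢
              omega, ?_⟩
            have htk : (r :: rt).take j' ≠ [] := by
              intro hnil
              rcases List.take_eq_nil_iff.mp hnil with h0 | h0
              · omega
              · simp at h0
            simp only [List.take_succ_cons]
            rw [join_cons_ne w ((r :: rt).take j') htk]
            simp only [List.length_append, List.length_cons]
            omega

-- markerL contains no space, so a prefix of "w ++ ' ' :: t" is a prefix of w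
theorem marker_prefix_ext (w t : List Char) :
    markerL <+: w ++ ' ' :: t ↔ markerL <+: w := by
  constructor
  · intro h
    by_cases hlen : markerL.length ≤ w.length
    · have := List.prefix_iff_eq_take.mp h
      rw [List.take_append_of_le_length hlen] at this
      exact this ▸ List.take_prefix _ _
    · exfalso
      have heq := List.prefix_iff_eq_take.mp h
      rw [List.take_append] at heq
      have hpos : 0 < markerL.length - w.length := by omega
      have hmem : ' ' ∈ markerL := by
        rw [heq]
        refine List.mem_append_right _ ?_
        have : (' ' :: t).take (markerL.length - w.length) = ' ' :: t.take (markerL.length - w.length - 1) := by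
          cases hk : markerL.length - w.length with
          | zero => omega
          | succ k => simp
        rw [this]; simp
      simp [markerL] at hmem
  · intro h
    exact h.trans (List.prefix_append w (' ' :: t))

-- markerL is a prefix of the joined string iff it is a prefix of the first word
theorem marker_prefix_head (w : List Char) (rest : List (List Char)) :
    markerL <+: PySem.Chars.join [' '] (w :: rest) ↔ markerL <+: w := by
  cases rest with
  | nil => rw [PySem.Chars.join_singleton]
  | cons r t => rw [join_cons_ne w (r :: t) (by simp)]; exact marker_prefix_ext w _

theorem marker_not_prefix_nil : ¬ markerL <+: ([] : List Char) := by
  intro h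
  have := List.prefix_nil.mp h
  simp [markerL] at this

-- find = k from an occurrence at k and none before k
theorem find_eq_of_first (s sub : List Char) (k : Nat)
    (h1 : sub <+: s.drop k) (h2 : ∀ i, i < k → ¬ sub <+: s.drop i) :
    PySem.Chars.find s sub = (k : Int) := by
  have hinf : sub <:+: s :=
    List.infix_iff_prefix_suffix.mpr ⟨s.drop k, h1, List.drop_suffix k s⟩
  have hnn : 0 ≤ PySem.Chars.find s sub := (PySem.Chars.find_nonneg_iff s sub).mpr hinf
  obtain ⟨hpre, hmin⟩ := PySem.Chars.find_spec hnn
  have hk : (PySem.Chars.find s sub).toNat = k := by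
    rcases lt_trichotomy (PySem.Chars.find s sub).toNat k with h | h | h
    · exact absurd hpre (h2 _ h)
    · exact h
    · exact absurd h1 (hmin k h)
  omega

-- word boundaries are strictly increasing in the word index
theorem blen_strict_mono (ls : List (List Char)) (hg : ∀ w ∈ ls, goodWord w)
    (l j : Nat) (hlj : l < j) (hjlen : j ≤ ls.length) :
    (PySem.Chars.join [' '] (ls.take l)).length < (PySem.Chars.join [' '] (ls.take j)).length := by
  have hgj : ∀ w ∈ ls.take j, goodWord w := fun w hw => hg w (List.mem_of_mem_take hw)
  have hjne : ls.take j ≠ [] := by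
    intro h
    rcases List.take_eq_nil_iff.mp h with h0 | h0
    · omega
    · subst h0; simp at hjlen; omega
  rcases Nat.eq_zero_or_pos l with hl0 | hlpos
  · subst hl0
    simpa using join_len_pos (ls.take j) hgj hjne
  · have hllen : l < (ls.take j).length := by
      rw [List.length_take, Nat.min_eq_left hjlen]; exact hlj
    have := join_split (ls.take j) l hlpos hllen
    rw [List.take_take, Nat.min_eq_left (le_of_lt hlj)] at this
    rw [this]
    simp

-- an occurrence of ' '::markerL at position i in the joined string means a marker word at some
-- boundary index l with i equal to that boundary
theorem occurrence_at_boundary (ls : List (List Char)) (hg : ∀ w ∈ ls, goodWord w)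
    (i : Nat) (h : (' ' :: markerL) <+: (PySem.Chars.join [' '] ls).drop i) :
    ∃ l, 0 < l ∧ ∃ (hlen : l < ls.length),
      i = (PySem.Chars.join [' '] (ls.take l)).length ∧ markerL <+: ls[l]'hlen := by
  obtain ⟨t, ht⟩ := h
  have hdrop : (PySem.Chars.join [' '] ls).drop i = ' ' :: (markerL ++ t) := by
    rw [← ht]; simp
  obtain ⟨l, hl0, hllen, hleq⟩ := space_drop ls hg i (markerL ++ t) hdrop
  have hsplit := join_split ls l hl0 hllen
  have hdrop2 : (PySem.Chars.join [' '] ls).drop i = ' ' :: PySem.Chars.join [' '] (ls.drop l) := by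
    rw [hsplit, hleq, List.drop_left]
  have hjoin : PySem.Chars.join [' '] (ls.drop l) = markerL ++ t := by
    have := hdrop2.symm.trans hdrop
    exact (List.cons.injEq _ _ _ _).mp this |>.2
  have hpre : markerL <+: PySem.Chars.join [' '] (ls.drop l) := ⟨t, hjoin.symm⟩
  have hdl : ls.drop l = ls[l] :: ls.drop (l + 1) := List.drop_eq_getElem_cons hllen
  rw [hdl] at hpre
  exact ⟨l, hl0, hllen, hleq, (marker_prefix_head _ _).mp hpre⟩

-- ===== A-side loop characterization (generic predicate form) =====
def loopGen (p : String → Bool) (words : List String)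
    (st : List String × List String × Bool) : List String × List String × Bool :=
  words.foldl (fun st word =>
    let is_article := if p word then true else st.2.2
    if is_article then (st.1 ++ [word], st.2.1, is_article)
    else (st.1, st.2.1 ++ [word], is_article)) st

theorem loopA_eq_gen (words : List String) (st : List String × List String × Bool) :
    getAbsArtLoopA words st
      = loopGen (fun w => PySem.Str.startswith w "article=") words st := rfl

theorem loopGen_true (p : String → Bool) (words : List String) (art abs : List String) :
    loopGen p words (art, abs, true) = (art ++ words, abs, true) := by
  induction words generalizing art with
  | nil => simp [loopGen]
  | cons w ws ih =>
      simp only [loopGen, List.foldl_cons] at *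
      split <;> simpa using ih (art ++ [w])

theorem loopGen_false (p : String → Bool) (words : List String) (art abs : List String) :
    loopGen p words (art, abs, false) =
      match words.findIdx? p with
      | none => (art, abs ++ words, false)
      | some i => (art ++ words.drop i, abs ++ words.take i, true) := by
  induction words generalizing art abs with
  | nil => simp [loopGen]
  | cons w ws ih =>
      by_cases hp : p w = true
      · have : loopGen p (w :: ws) (art, abs, false)
            = loopGen p ws (art ++ [w], abs, true) := by
          simp [loopGen, hp]
        rw [this, loopGen_true]
        simp [List.findIdx?_cons, hp]
      · have : loopGen p (w :: ws) (art, abs, false)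
            = loopGen p ws (art, abs ++ [w], false) := by
          simp [loopGen, hp]
        rw [this, ih]
        rw [List.findIdx?_cons]
        cases h : ws.findIdx? p with
        | none => simp [hp, h]
        | some i => simp [hp, h]

-- ===== main equivalence =====
theorem join_empty_str : PySem.Str.join " " ([] : List String) = "" := by
  apply String.toList_inj.mp
  simp [PySem.Str.toList_join, PySem.Chars.join_nil]

theorem marker_toList : ("article=" : String).toList = markerL := by decide

theorem smarker_toList : (" article=" : String).toList = ' ' :: markerL := by decide

theorem sep_toList : (" " : String).toList = [' '] := by decide

theorem norm_toList (sent : String) :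
    (PySem.Str.join " " (PySem.Str.split₀ sent)).toList
      = PySem.Chars.join [' '] ((PySem.Str.split₀ sent).map String.toList) := by
  rw [PySem.Str.toList_join, sep_toList]

theorem findIdx?_bridge (sent : String) :
    (PySem.Str.split₀ sent).findIdx? (fun w => PySem.Str.startswith w "article=")
      = ((PySem.Str.split₀ sent).map String.toList).findIdx?
          (fun l => PySem.Chars.startswith l markerL) := by
  rw [List.findIdx?_map]
  congr 1

-- no marker word: the search string never occurs in the normalized sentence
theorem no_marker_no_occurrence (ls : List (List Char)) (hg : ∀ w ∈ ls, goodWord w)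
    (hall : ∀ l ∈ ls, ¬ markerL <+: l) :
    ¬ (' ' :: markerL) <:+: PySem.Chars.join [' '] ls := by
  intro hinf
  obtain ⟨t, hpre, hsuf⟩ := List.infix_iff_prefix_suffix.mp hinf
  obtain ⟨u, hu⟩ := hsuf
  have ht : t = (PySem.Chars.join [' '] ls).drop u.length := by
    rw [← hu, List.drop_left]
  rw [ht] at hpre
  obtain ⟨l, _, hlen, _, hml⟩ := occurrence_at_boundary ls hg u.length hpre
  exact hall (ls[l]'hlen) (List.getElem_mem hlen) hml

-- no marker word: the normalized sentence does not start with the marker either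
theorem no_marker_no_head (ls : List (List Char)) (hall : ∀ l ∈ ls, ¬ markerL <+: l) :
    ¬ markerL <+: PySem.Chars.join [' '] ls := by
  intro h
  cases ls with
  | nil => exact marker_not_prefix_nil (by simpa [PySem.Chars.join_nil] using h)
  | cons w rest => exact hall w (by simp) ((marker_prefix_head w rest).mp h)

theorem marker_prefix_head0 (ls : List (List Char)) (h : 0 < ls.length) :
    markerL <+: PySem.Chars.join [' '] ls ↔ markerL <+: ls[0]'h := by
  cases ls with
  | nil => simp at h
  | cons w rest => exact marker_prefix_head w rest

theorem drop_len_succ (x y : List Char) (c : Char) : (x ++ c :: y).drop (x.length + 1) = y := by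
  rw [List.drop_append, List.drop_eq_nil_of_le (by omega : x.length ≤ x.length + 1)]
  have h1 : x.length + 1 - x.length = 1 := by omega
  rw [h1]
  simp

theorem get_abs_art_eq (sent : String) : get_abs_art sent = get_abs_art_alt sent := by
  have hgood : ∀ w ∈ PySem.Chars.split₀ sent.toList, goodWord w := split₀_good sent.toList
  have hnorm : (PySem.Str.join " " (PySem.Str.split₀ sent)).toList
      = PySem.Chars.join [' '] (PySem.Chars.split₀ sent.toList) := by
    rw [norm_toList, PySem.Str.split₀_map_toList]
  have hbridge : (PySem.Str.split₀ sent).findIdx? (fun w => PySem.Str.startswith w "article=")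
      = (PySem.Chars.split₀ sent.toList).findIdx? (fun l => PySem.Chars.startswith l markerL) := by
    rw [findIdx?_bridge, PySem.Str.split₀_map_toList]
  unfold get_abs_art get_abs_art_alt
  rw [loopA_eq_gen, loopGen_false, hbridge]
  cases hf : (PySem.Chars.split₀ sent.toList).findIdx?
      (fun l => PySem.Chars.startswith l markerL) with
  | none =>
      have hall : ∀ l ∈ PySem.Chars.split₀ sent.toList, ¬ markerL <+: l := by
        intro l hl hp
        have := List.findIdx?_eq_none_iff.mp hf l hl
        rw [(PySem.Chars.startswith_iff l markerL).mpr hp] at this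
        exact Bool.true_eq_false.mp this
      have hsw : PySem.Str.startswith (PySem.Str.join " " (PySem.Str.split₀ sent)) "article=" = false := by
        rw [PySem.Str.startswith_eq, marker_toList, hnorm, Bool.eq_false_iff]
        intro h
        exact no_marker_no_head _ hall ((PySem.Chars.startswith_iff _ _).mp h)
      have hfind : PySem.Str.find (PySem.Str.join " " (PySem.Str.split₀ sent)) " article=" = -1 := by
        rw [PySem.Str.find_eq, smarker_toList, hnorm]
        exact (PySem.Chars.find_eq_neg_one_iff _ _).mpr (no_marker_no_occurrence _ hgood hall)
      simp only [hsw, hfind, Bool.false_eq_true, if_false, List.nil_append]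
      norm_num [join_empty_str]
  | some j =>
      have hspec := List.findIdx?_eq_some_iff_findIdx_eq.mp hf
      have hjlen : j < (PySem.Chars.split₀ sent.toList).length := hspec.1
      have hidx : List.findIdx (fun l => PySem.Chars.startswith l markerL)
          (PySem.Chars.split₀ sent.toList) = j := hspec.2
      have hpj : markerL <+: (PySem.Chars.split₀ sent.toList)[j]'hjlen := by
        apply (PySem.Chars.startswith_iff _ _).mp
        have := List.findIdx_getElem (p := fun l => PySem.Chars.startswith l markerL)
          (xs := PySem.Chars.split₀ sent.toList) (w := by rw [hidx]; exact hjlen)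
        simp only [hidx] at this
        exact this
      have hlt : ∀ k (hk : k < j), ¬ markerL <+:
          (PySem.Chars.split₀ sent.toList)[k]'(by omega) := by
        intro k hk hp
        have := List.not_of_lt_findIdx (p := fun l => PySem.Chars.startswith l markerL)
          (xs := PySem.Chars.split₀ sent.toList) (i := k) (by rw [hidx]; exact hk)
        exact Bool.true_eq_false.mp
          (((PySem.Chars.startswith_iff _ _).mpr hp).symm.trans this)
      rcases Nat.eq_zero_or_pos j with hj0 | hjpos
      · -- j = 0: the first word already carries the marker
        subst hj0
        have hsw : PySem.Str.startswith (PySem.Str.join " " (PySem.Str.split₀ sent)) "article=" = true := by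
          rw [PySem.Str.startswith_eq, marker_toList, hnorm]
          exact (PySem.Chars.startswith_iff _ _).mpr
            ((marker_prefix_head0 _ (by omega)).mpr hpj)
        simp only [hsw, if_true, List.nil_append, List.take_zero, List.drop_zero]
        norm_num [join_empty_str]
      · -- j ≥ 1: the boundary is inside the normalized string
        have hswf : PySem.Str.startswith (PySem.Str.join " " (PySem.Str.split₀ sent)) "article=" = false := by
          rw [PySem.Str.startswith_eq, marker_toList, hnorm, Bool.eq_false_iff]
          intro h
          exact hlt 0 hjpos ((marker_prefix_head0 _ (by omega)).mp
            ((PySem.Chars.startswith_iff _ _).mp h))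
        have hsplit := join_split (PySem.Chars.split₀ sent.toList) j hjpos hjlen
        have hdropj : (PySem.Chars.split₀ sent.toList).drop j
            = (PySem.Chars.split₀ sent.toList)[j]'hjlen :: (PySem.Chars.split₀ sent.toList).drop (j + 1) :=
          List.drop_eq_getElem_cons hjlen
        have h1 : (' ' :: markerL) <+: (PySem.Chars.join [' '] (PySem.Chars.split₀ sent.toList)).drop
            (PySem.Chars.join [' '] ((PySem.Chars.split₀ sent.toList).take j)).length := by
          rw [hsplit, List.drop_left, List.cons_prefix_cons]
          refine ⟨rfl, ?_⟩
          rw [hdropj]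
          exact (marker_prefix_head _ _).mpr hpj
        have h2 : ∀ i, i < (PySem.Chars.join [' '] ((PySem.Chars.split₀ sent.toList).take j)).length →
            ¬ (' ' :: markerL) <+: (PySem.Chars.join [' '] (PySem.Chars.split₀ sent.toList)).drop i := by
          intro i hi hocc
          obtain ⟨l, hl0, hllen, hieq, hml⟩ :=
            occurrence_at_boundary (PySem.Chars.split₀ sent.toList) hgood i hocc
          have hlj : l < j := by
            by_contra hc
            push_neg at hc
            rcases Nat.eq_or_lt_of_le hc with h | h
            · subst h; omega
            · have := blen_strict_mono (PySem.Chars.split₀ sent.toList) hgood j l h (le_of_lt hllen)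
              omega
          exact hlt l hlj hml
        have hfind : PySem.Str.find (PySem.Str.join " " (PySem.Str.split₀ sent)) " article="
            = ((PySem.Chars.join [' '] ((PySem.Chars.split₀ sent.toList).take j)).length : Int) := by
          rw [PySem.Str.find_eq, smarker_toList, hnorm]
          exact find_eq_of_first _ _ _ h1 h2
        have e1 : PySem.Str.join " " ((PySem.Str.split₀ sent).take j)
            = PySem.Str.slice (PySem.Str.join " " (PySem.Str.split₀ sent)) none
                (some ((PySem.Chars.join [' '] ((PySem.Chars.split₀ sent.toList).take j)).length : Int)) := by
          apply String.toList_inj.mp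
          rw [PySem.Str.toList_join, sep_toList, PySem.Str.toList_slice]
          simp only [PySem.Chars.slice_eq_listSlice]
          rw [PySem.List.slice_to _ (by omega :
            (0:Int) ≤ ((PySem.Chars.join [' '] ((PySem.Chars.split₀ sent.toList).take j)).length : Int))]
          rw [hnorm, hsplit, Int.toNat_natCast, List.take_left]
          rw [List.map_take, PySem.Str.split₀_map_toList]
        have e2 : PySem.Str.join " " ((PySem.Str.split₀ sent).drop j)
            = PySem.Str.slice (PySem.Str.join " " (PySem.Str.split₀ sent))
                (some (((PySem.Chars.join [' '] ((PySem.Chars.split₀ sent.toList).take j)).length : Int) + 1)) none := by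
          apply String.toList_inj.mp
          rw [PySem.Str.toList_join, sep_toList, PySem.Str.toList_slice]
          simp only [PySem.Chars.slice_eq_listSlice]
          rw [PySem.List.slice_from _ (by omega :
            (0:Int) ≤ ((PySem.Chars.join [' '] ((PySem.Chars.split₀ sent.toList).take j)).length : Int) + 1)]
          rw [List.map_drop, PySem.Str.split₀_map_toList, hnorm, hsplit]
          have htn : ((((PySem.Chars.join [' '] ((PySem.Chars.split₀ sent.toList).take j)).length : Int)) + 1).toNat
              = (PySem.Chars.join [' '] ((PySem.Chars.split₀ sent.toList).take j)).length + 1 := by omega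
          rw [htn, drop_len_succ]
        simp only [hswf, Bool.false_eq_true, if_false, hfind]
        rw [if_neg (by omega :
          ¬ ((PySem.Chars.join [' '] ((PySem.Chars.split₀ sent.toList).take j)).length : Int) = -1)]
        rw [if_neg (by omega :
          ¬ ((PySem.Chars.join [' '] ((PySem.Chars.split₀ sent.toList).take j)).length : Int) + 1 = -1)]
        rw [if_neg (by omega :
          ¬ ((PySem.Chars.join [' '] ((PySem.Chars.split₀ sent.toList).take j)).length : Int) + 1 = 0)]
        have hsub : ((PySem.Chars.join [' '] ((PySem.Chars.split₀ sent.toList).take j)).length : Int) + 1 - 1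
            = ((PySem.Chars.join [' '] ((PySem.Chars.split₀ sent.toList).take j)).length : Int) := by omega
        rw [hsub, ← e1, ← e2]
        simp only [List.nil_append]

-- ===== VERDICT =====
theorem get_abs_art_spec : Claim_equal_get_abs_art := by
  intro sent _
  exact get_abs_art_eq sent
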